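-- pv_equiv track=rewrite | github.com/yanader/mooc-programming-23 | part06-14_course_grading_part_4/src/course_grading_part_4.py | create_grades
-- ===== SOURCE A (Python) =====
-- def create_grades(stu_dict: dict,exer_dict: dict, points_dict: dict):
--     grade_dict = {}
--     return_string = ''
--     for id, name in stu_dict.items():
--         exercise_points = exer_dict[id] // 4
--         total_points = exercise_points + points_dict[id]
--         grade = convert_to_grade(total_points)
--         return_string += f'{id};{name};{grade}' + '\n'
--     return return_string
--
-- def convert_to_grade(i: int):
--     if i < 15:
--         return 0
--     elif i < 18:
--         return 1
--     elif i < 21: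
--         return 2
--     elif i < 24:
--         return 3
--     elif i < 28:
--         return 4
--     else:
--         return 5
-- ===== SOURCE B (Python) =====
-- THRESHOLDS = [15, 18, 21, 24, 28]
--
--
-- def _bisect_right(a, x):
--     # hand-written bisect_right (binary search): index of first element > x
--     lo, hi = 0, len(a)
--     while lo < hi:
--         mid = (lo + hi) // 2
--         if x < a[mid]:
--             hi = mid
--         else:
--             lo = mid + 1
--     return lo
--
--
-- def create_grades(stu_dict: dict, exer_dict: dict, points_dict: dict):
--     # stage 1: grade per student via binary search over the sorted threshold table
--     grades = [_bisect_right(THRESHOLDS, exer_dict[id] // 4 + points_dict[id])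
--               for id in stu_dict]
--     # stage 2: format rows, stage 3: join
--     lines = [f'{id};{name};{g}\n'
--              for (id, name), g in zip(stu_dict.items(), grades)]
--     return ''.join(lines)
-- ===== Notes on version B (the rewrite author's own statement) =====
-- stated objective: alternative
-- what changed: The if-elif grade cascade is replaced by a hand-written binary search (bisect_right) over a sorted threshold table, and the single accumulating loop is replaced by staged passes: a grades list, then formatted rows zipped with it, then ''.join.
import Mathlib
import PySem

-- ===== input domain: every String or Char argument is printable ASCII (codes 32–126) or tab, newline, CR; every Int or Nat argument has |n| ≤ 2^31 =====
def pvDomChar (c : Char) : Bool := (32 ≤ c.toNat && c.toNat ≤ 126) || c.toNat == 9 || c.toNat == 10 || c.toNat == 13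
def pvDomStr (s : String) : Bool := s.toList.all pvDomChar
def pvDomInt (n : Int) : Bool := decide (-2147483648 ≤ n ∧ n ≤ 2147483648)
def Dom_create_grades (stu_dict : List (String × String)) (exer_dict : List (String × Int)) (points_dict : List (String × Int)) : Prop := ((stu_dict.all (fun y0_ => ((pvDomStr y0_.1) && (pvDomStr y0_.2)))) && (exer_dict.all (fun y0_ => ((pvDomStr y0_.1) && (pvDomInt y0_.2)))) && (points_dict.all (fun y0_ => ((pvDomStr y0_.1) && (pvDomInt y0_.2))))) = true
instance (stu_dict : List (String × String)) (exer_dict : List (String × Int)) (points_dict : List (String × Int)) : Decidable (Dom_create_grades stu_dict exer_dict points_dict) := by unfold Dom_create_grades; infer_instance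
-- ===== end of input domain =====

-- B replaces the if-elif grade cascade by a binary search (bisect_right) over a sorted threshold
-- table, and builds the report in staged passes (grades list, formatted rows, join) instead of a
-- string accumulator loop (alternative; same cost).


-- ===== PORT A =====
def convert_to_grade (i : Int) : Int :=
  if i < 15 then 0
  else if i < 18 then 1
  else if i < 21 then 2
  else if i < 24 then 3
  else if i < 28 then 4
  else 5

-- exer_dict[id] / points_dict[id]: `none` = Python's KeyError; those inputs are excluded by Pre_.
def create_grades (stu_dict : List (String × String)) (exer_dict : List (String × Int)) (points_dict : List (String × Int)) : String :=
  stu_dict.foldl (fun return_string idname =>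
    let exercise_points := PySem.Int.floordiv ((PySem.Dict.get? ⟨exer_dict⟩ idname.1).getD 0) 4
    let total_points := exercise_points + (PySem.Dict.get? ⟨points_dict⟩ idname.1).getD 0
    let grade := convert_to_grade total_points
    return_string ++ (idname.1 ++ ";" ++ idname.2 ++ ";" ++ PySem.Int.toStr grade ++ "\n")) ""

-- ===== PORT B =====
def pvTHRESHOLDS : List Int := [15, 18, 21, 24, 28]

-- _bisect_right's while-loop as the obvious recursion on (lo, hi); a[mid] via getD
-- (the guard lo < hi ≤ len a keeps mid in range, so this equals Python's a[mid]).
def pvBisectRight (a : List Int) (x : Int) (lo hi : Nat) : Nat :=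
  if _h : lo < hi then
    let mid := (lo + hi) / 2
    if x < a.getD mid 0 then pvBisectRight a x lo mid
    else pvBisectRight a x (mid + 1) hi
  else lo
termination_by hi - lo
decreasing_by all_goals omega

def create_grades_alt (stu_dict : List (String × String)) (exer_dict : List (String × Int)) (points_dict : List (String × Int)) : String :=
  let grades := stu_dict.map (fun p =>
    pvBisectRight pvTHRESHOLDS
      (PySem.Int.floordiv ((PySem.Dict.get? ⟨exer_dict⟩ p.1).getD 0) 4
        + (PySem.Dict.get? ⟨points_dict⟩ p.1).getD 0) 0 pvTHRESHOLDS.length)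
  let lines := (stu_dict.zip grades).map (fun pg =>
    pg.1.1 ++ ";" ++ pg.1.2 ++ ";" ++ PySem.Int.toStr (Int.ofNat pg.2) ++ "\n")
  PySem.Str.join "" lines

-- ===== PRECONDITION & SPEC =====
-- Pre_ excludes exactly the inputs on which Python A raises KeyError: a student id missing
-- from exer_dict or points_dict.
def Pre_create_grades (stu_dict : List (String × String)) (exer_dict : List (String × Int)) (points_dict : List (String × Int)) : Prop :=
  (stu_dict.all (fun p => (PySem.Dict.get? ⟨exer_dict⟩ p.1).isSome && (PySem.Dict.get? ⟨points_dict⟩ p.1).isSome)) = true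
instance (stu_dict : List (String × String)) (exer_dict : List (String × Int)) (points_dict : List (String × Int)) : Decidable (Pre_create_grades stu_dict exer_dict points_dict) := by unfold Pre_create_grades; infer_instance

def pvWitness_create_grades : (List (String × String)) × (List (String × Int)) × (List (String × Int)) :=
  ([("07", "Alice"), ("12", "Bob")], [("07", 40), ("12", 99)], [("07", 10), ("12", 3)])

def Spec_create_grades (stu_dict : List (String × String)) (exer_dict : List (String × Int)) (points_dict : List (String × Int)) (out : String) : Prop := out = create_grades_alt stu_dict exer_dict points_dict
instance (stu_dict : List (String × String)) (exer_dict : List (String × Int)) (points_dict : List (String × Int)) (out : String) : Decidable (Spec_create_grades stu_dict exer_dict points_dict out) := by unfold Spec_create_grades; infer_instance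

-- ===== CLAIM (what is proved, stated in full; the proofs are below) =====
def Claim_equal_create_grades : Prop := ∀ (stu_dict : List (String × String)) (exer_dict : List (String × Int)) (points_dict : List (String × Int)), Dom_create_grades stu_dict exer_dict points_dict → Pre_create_grades stu_dict exer_dict points_dict → Spec_create_grades stu_dict exer_dict points_dict (create_grades stu_dict exer_dict points_dict)

-- ===== LEMMAS AND PROOFS =====

-- Binary search over the concrete threshold table agrees with the cascade on every total.
theorem pvBisect_eq_convert (x : Int) :
    Int.ofNat (pvBisectRight pvTHRESHOLDS x 0 pvTHRESHOLDS.length) = convert_to_grade x := by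
  simp only [pvTHRESHOLDS, convert_to_grade, List.length]
  simp [pvBisectRight]
  split_ifs <;> omega

-- zipping a list with its own map, then mapping, is a single map.
theorem pv_zip_map_self {α β γ : Type} (l : List α) (g : α → β) (h : α × β → γ) :
    ((l.zip (l.map g)).map h) = l.map (fun a => h (a, g a)) := by
  induction l with
  | nil => rfl
  | cons a t ih => simp [ih]

-- Accumulating with ++ over a list equals appending ''.join of the mapped list.
theorem pv_foldl_append_eq_join (f : String × String → String) (l : List (String × String)) (acc : String) :
    l.foldl (fun r p => r ++ f p) acc = acc ++ PySem.Str.join "" (l.map f) := by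
  induction l generalizing acc with
  | nil =>
    apply String.toList_inj.mp
    simp [PySem.Str.toList_join, PySem.Chars.join, List.intercalate]
  | cons p rest ih =>
    simp only [List.foldl_cons, List.map_cons, ih]
    apply String.toList_inj.mp
    cases rest with
    | nil => simp [PySem.Str.toList_join, PySem.Chars.join, List.intercalate]
    | cons q r => simp [PySem.Str.toList_join, PySem.Chars.join_cons_cons]

-- ===== VERDICT (by name: the statement is the Claim_ definition above) =====
theorem create_grades_spec : Claim_equal_create_grades := by
  intro stu_dict exer_dict points_dict _ _
  unfold Spec_create_grades create_grades create_grades_alt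
  dsimp only
  rw [pv_zip_map_self]
  simp only [pvBisect_eq_convert]
  rw [pv_foldl_append_eq_join (fun idname =>
    idname.1 ++ ";" ++ idname.2 ++ ";" ++
      PySem.Int.toStr (convert_to_grade (PySem.Int.floordiv ((PySem.Dict.get? ⟨exer_dict⟩ idname.1).getD 0) 4
        + (PySem.Dict.get? ⟨points_dict⟩ idname.1).getD 0)) ++ "\n") stu_dict ""]
  apply String.toList_inj.mp
  simp
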